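-- pv_equiv track=rewrite | github.com/KatarzynaPaczos/PDFClassification | src/functions.py | detect_form_type
-- ===== SOURCE A (Python) =====
-- def detect_form_type(text: str) -> str:
--     text = text.lower()
--     positions = {}
--     for form in ["form 1040", "form w-2", "form 1099"]:
--         idx = text.find(form)
--         if idx != -1:
--             positions[form] = idx
--     if not positions:
--         return "OTHER"
--
--     earliest_form = min(positions, key=positions.get) # type: ignore
--     return {
--         "form 1040": "1040",
--         "form w-2": "W2",
--         "form 1099": "1099"
--     }[earliest_form]
-- ===== SOURCE B (Python) =====
-- def detect_form_type(text: str) -> str: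
--     t = text.lower()
--     table = (("form 1040", "1040"), ("form w-2", "W2"), ("form 1099", "1099"))
--     for i in range(len(t)):
--         for form, label in table:
--             if t.startswith(form, i):
--                 return label
--     return "OTHER"
-- ===== Notes on version B (the rewrite author's own statement) =====
-- stated objective: alternative
-- what changed: Replaced three separate str.find scans plus a min-by-position dict selection with a single left-to-right positional scan that returns the label of the first pattern matching at the earliest index.
import Mathlib
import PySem

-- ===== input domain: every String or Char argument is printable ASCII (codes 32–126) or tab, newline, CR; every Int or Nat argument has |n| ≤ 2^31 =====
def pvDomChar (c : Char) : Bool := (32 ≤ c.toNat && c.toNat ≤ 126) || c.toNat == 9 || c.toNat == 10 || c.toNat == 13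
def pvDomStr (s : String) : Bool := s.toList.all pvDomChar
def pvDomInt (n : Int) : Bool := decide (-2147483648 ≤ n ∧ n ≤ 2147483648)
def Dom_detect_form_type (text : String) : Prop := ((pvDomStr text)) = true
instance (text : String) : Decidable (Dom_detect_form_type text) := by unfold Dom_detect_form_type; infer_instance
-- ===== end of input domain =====

-- B replaces A's three find scans + min-by-position selection with one positional left-to-right scan (alternative decomposition, same cost).

-- ===== PORT A =====
def detect_form_type (text : String) : String :=
  let t := PySem.Str.lower text
  let positions :=
    (["form 1040", "form w-2", "form 1099"]).foldl
      (fun d form =>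
        let idx := PySem.Str.find t form
        if idx ≠ -1 then d.insert form idx else d)
      (PySem.Dict.empty : PySem.Dict String Int)
  if positions.size = 0 then "OTHER"
  else
    -- min(positions, key=positions.get): positions is nonempty here, so min? is some; the "" defaults are dead
    -- (KeyError on the mapping dict is impossible: earliest is one of its three keys)
    let earliest := (PySem.List.min? positions.keys (fun k => positions.getD k 0)).getD ""
    (PySem.Dict.ofList [("form 1040", "1040"), ("form w-2", "W2"), ("form 1099", "1099")]).getD earliest ""


-- ===== PORT B =====
-- inner loop of Source B: first (form, label) of the table with t.startswith(form, i)
def pvScanHere (s : List Char) : Option String :=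
  if PySem.Chars.startswith s ("form 1040".toList) then some "1040"
  else if PySem.Chars.startswith s ("form w-2".toList) then some "W2"
  else if PySem.Chars.startswith s ("form 1099".toList) then some "1099"
  else none

-- outer loop of Source B: 'for i in range(len(t))' with t.startswith(form, i), i.e. recursion over the suffixes of t
def pvScan : List Char → String
  | [] => "OTHER"
  | c :: tl =>
    match pvScanHere (c :: tl) with
    | some lab => lab
    | none => pvScan tl

def detect_form_type_alt (text : String) : String :=
  pvScan ((PySem.Str.lower text).toList)

-- ===== PRECONDITION & SPEC =====
def Spec_detect_form_type (text : String) (out : String) : Prop := out = detect_form_type_alt text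
instance (text : String) (out : String) : Decidable (Spec_detect_form_type text out) := by unfold Spec_detect_form_type; infer_instance

-- ===== CLAIM (what is proved, stated in full; the proofs are below) =====
def Claim_equal_detect_form_type : Prop := ∀ (text : String), Dom_detect_form_type text → Spec_detect_form_type text (detect_form_type text)

-- ===== LEMMAS AND PROOFS =====

-- the common selection function: given the three find results, the label of the earliest present pattern
def pvSel (f1 f2 f3 : Int) : String :=
  if 0 ≤ f1 ∧ (f2 = -1 ∨ f1 ≤ f2) ∧ (f3 = -1 ∨ f1 ≤ f3) then "1040"
  else if 0 ≤ f2 ∧ (f3 = -1 ∨ f2 ≤ f3) then "W2"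
  else if 0 ≤ f3 then "1099"
  else "OTHER"

theorem pv_find_eq_of (t p : List Char) (k : ℕ) (hk : p <+: t.drop k)
    (hmin : ∀ i < k, ¬ p <+: t.drop i) : PySem.Chars.find t p = (k : Int) := by
  have hnn : 0 ≤ PySem.Chars.find t p :=
    (PySem.Chars.find_nonneg_iff t p).2 (hk.isInfix.trans (List.drop_suffix k t).isInfix)
  obtain ⟨hpre, hfirst⟩ := PySem.Chars.find_spec hnn
  rcases lt_trichotomy (PySem.Chars.find t p).toNat k with h | h | h
  · exact absurd hpre (hmin _ h)
  · omega
  · exact absurd hk (hfirst k h)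

theorem pv_find_cons (c : Char) (t p : List Char) :
    PySem.Chars.find (c :: t) p =
      if PySem.Chars.startswith (c :: t) p then 0
      else if PySem.Chars.find t p = -1 then -1 else PySem.Chars.find t p + 1 := by
  by_cases hs : PySem.Chars.startswith (c :: t) p
  · rw [if_pos hs]
    have hp : p <+: (c :: t) := (PySem.Chars.startswith_iff _ _).1 hs
    simpa using pv_find_eq_of (c :: t) p 0 (by simpa using hp) (by omega)
  · rw [if_neg hs]
    have hnp : ¬ p <+: (c :: t) := fun h => hs ((PySem.Chars.startswith_iff _ _).2 h)
    by_cases h0 : PySem.Chars.find t p = -1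
    · rw [if_pos h0]
      have hni : ¬ p <:+: t := (PySem.Chars.find_eq_neg_one_iff t p).1 h0
      refine (PySem.Chars.find_eq_neg_one_iff _ _).2 ?_
      intro hinf
      rcases List.infix_cons_iff.1 hinf with h | h
      · exact hnp h
      · exact hni h
    · rw [if_neg h0]
      have hb : -1 ≤ PySem.Chars.find t p := PySem.Chars.neg_one_le_find t p
      have hnn : 0 ≤ PySem.Chars.find t p := by omega
      obtain ⟨hpre, hfirst⟩ := PySem.Chars.find_spec hnn
      have := pv_find_eq_of (c :: t) p ((PySem.Chars.find t p).toNat + 1)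
        (by simpa using hpre)
        (by
          intro i hi
          match i with
          | 0 => simpa using hnp
          | Nat.succ j => simpa using hfirst j (by omega))
      omega

theorem pvSel_first (f2 f3 : Int) (h2 : -1 ≤ f2) (h3 : -1 ≤ f3) :
    pvSel 0 f2 f3 = "1040" := by
  unfold pvSel; split_ifs <;> first | rfl | ((try simp only [false_or, or_false, true_or, or_true] at *); omega)

theorem pvSel_second (f1 f3 : Int) (h1 : f1 = -1 ∨ 1 ≤ f1) (h3 : -1 ≤ f3) :
    pvSel f1 0 f3 = "W2" := by
  unfold pvSel; split_ifs <;> first | rfl | ((try simp only [false_or, or_false, true_or, or_true] at *); omega)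

theorem pvSel_third (f1 f2 : Int) (h1 : f1 = -1 ∨ 1 ≤ f1) (h2 : f2 = -1 ∨ 1 ≤ f2) :
    pvSel f1 f2 0 = "1099" := by
  unfold pvSel; split_ifs <;> first | rfl | ((try simp only [false_or, or_false, true_or, or_true] at *); omega)

theorem pvSel_shift_aux (g1 g2 g3 f1 f2 f3 : Int)
    (c1 : f1 = -1 ∧ g1 = -1 ∨ f1 = g1 + 1 ∧ 0 ≤ g1)
    (c2 : f2 = -1 ∧ g2 = -1 ∨ f2 = g2 + 1 ∧ 0 ≤ g2)
    (c3 : f3 = -1 ∧ g3 = -1 ∨ f3 = g3 + 1 ∧ 0 ≤ g3) :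
    pvSel f1 f2 f3 = pvSel g1 g2 g3 := by
  rcases c1 with ⟨e1, d1⟩ | ⟨e1, d1⟩ <;> rcases c2 with ⟨e2, d2⟩ | ⟨e2, d2⟩ <;>
    rcases c3 with ⟨e3, d3⟩ | ⟨e3, d3⟩ <;> subst e1 <;> subst e2 <;> subst e3 <;>
    unfold pvSel <;> split_ifs <;> first | rfl | omega

theorem pvSel_shift (g1 g2 g3 : Int) (h1 : -1 ≤ g1) (h2 : -1 ≤ g2) (h3 : -1 ≤ g3) :
    pvSel (if g1 = -1 then -1 else g1 + 1) (if g2 = -1 then -1 else g2 + 1)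
      (if g3 = -1 then -1 else g3 + 1) = pvSel g1 g2 g3 := by
  apply pvSel_shift_aux <;> split_ifs <;> omega

theorem pv_shift_cases (g : Int) (hg : -1 ≤ g) :
    (if g = -1 then (-1 : Int) else g + 1) = -1 ∨ 1 ≤ (if g = -1 then (-1 : Int) else g + 1) := by
  split_ifs <;> omega

theorem pvScan_eq_pvSel (t : List Char) :
    pvScan t = pvSel (PySem.Chars.find t ("form 1040".toList))
      (PySem.Chars.find t ("form w-2".toList)) (PySem.Chars.find t ("form 1099".toList)) := by
  induction t with
  | nil =>
    have e1 : PySem.Chars.find ([] : List Char) ("form 1040".toList) = -1 := by decide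
    have e2 : PySem.Chars.find ([] : List Char) ("form w-2".toList) = -1 := by decide
    have e3 : PySem.Chars.find ([] : List Char) ("form 1099".toList) = -1 := by decide
    rw [e1, e2, e3]
    rfl
  | cons c tl ih =>
    have b1 : -1 ≤ PySem.Chars.find tl ("form 1040".toList) := PySem.Chars.neg_one_le_find _ _
    have b2 : -1 ≤ PySem.Chars.find tl ("form w-2".toList) := PySem.Chars.neg_one_le_find _ _
    have b3 : -1 ≤ PySem.Chars.find tl ("form 1099".toList) := PySem.Chars.neg_one_le_find _ _
    rw [pv_find_cons, pv_find_cons, pv_find_cons]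
    by_cases s1 : PySem.Chars.startswith (c :: tl) ("form 1040".toList)
    · rw [if_pos s1]
      have hsc : pvScan (c :: tl) = "1040" := by
        unfold pvScan pvScanHere
        rw [if_pos s1]
      rw [hsc]
      exact (pvSel_first _ _ (by split_ifs <;> omega) (by split_ifs <;> omega)).symm
    · rw [if_neg s1]
      by_cases s2 : PySem.Chars.startswith (c :: tl) ("form w-2".toList)
      · rw [if_pos s2]
        have hsc : pvScan (c :: tl) = "W2" := by
          unfold pvScan pvScanHere
          rw [if_neg s1, if_pos s2]
        rw [hsc]
        exact (pvSel_second _ _ (pv_shift_cases _ b1) (by split_ifs <;> omega)).symm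
      · rw [if_neg s2]
        by_cases s3 : PySem.Chars.startswith (c :: tl) ("form 1099".toList)
        · rw [if_pos s3]
          have hsc : pvScan (c :: tl) = "1099" := by
            unfold pvScan pvScanHere
            rw [if_neg s1, if_neg s2, if_pos s3]
          rw [hsc]
          exact (pvSel_third _ _ (pv_shift_cases _ b1) (pv_shift_cases _ b2)).symm
        · rw [if_neg s3]
          have hsc : pvScan (c :: tl) = pvScan tl := by
            have e : pvScan (c :: tl) =
                (match pvScanHere (c :: tl) with | some lab => lab | none => pvScan tl) := rfl
            rw [e]
            unfold pvScanHere
            rw [if_neg s1, if_neg s2, if_neg s3]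
          rw [hsc, ih]
          exact (pvSel_shift _ _ _ b1 b2 b3).symm

-- A's body with the three find results abstracted out
def pvE (f1 f2 f3 : Int) : String :=
  let positions :=
    (if f3 ≠ -1 then
      ((if f2 ≠ -1 then
          ((if f1 ≠ -1 then (PySem.Dict.empty : PySem.Dict String Int).insert "form 1040" f1
            else PySem.Dict.empty).insert "form w-2" f2)
        else
          (if f1 ≠ -1 then (PySem.Dict.empty : PySem.Dict String Int).insert "form 1040" f1
            else PySem.Dict.empty)).insert "form 1099" f3)
    else
      (if f2 ≠ -1 then
          ((if f1 ≠ -1 then (PySem.Dict.empty : PySem.Dict String Int).insert "form 1040" f1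
            else PySem.Dict.empty).insert "form w-2" f2)
        else
          (if f1 ≠ -1 then (PySem.Dict.empty : PySem.Dict String Int).insert "form 1040" f1
            else PySem.Dict.empty)))
  if positions.size = 0 then "OTHER"
  else
    let earliest := (PySem.List.min? positions.keys (fun k => positions.getD k 0)).getD ""
    (PySem.Dict.ofList [("form 1040", "1040"), ("form w-2", "W2"), ("form 1099", "1099")]).getD earliest ""

theorem pvA_eq_pvE (t : String) :
    detect_form_type t =
      pvE (PySem.Chars.find (PySem.Str.lower t).toList ("form 1040".toList))
        (PySem.Chars.find (PySem.Str.lower t).toList ("form w-2".toList))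
        (PySem.Chars.find (PySem.Str.lower t).toList ("form 1099".toList)) := by
  unfold detect_form_type pvE
  simp only [List.foldl, PySem.Str.find_eq]

set_option maxHeartbeats 2000000 in
theorem pvE_eq_pvSel (f1 f2 f3 : Int) (b1 : -1 ≤ f1) (b2 : -1 ≤ f2) (b3 : -1 ≤ f3) :
    pvE f1 f2 f3 = pvSel f1 f2 f3 := by
  by_cases h1 : f1 = -1 <;> by_cases h2 : f2 = -1 <;> by_cases h3 : f3 = -1 <;>
    simp [pvE, h1, h2, h3,
      PySem.Dict.empty, PySem.Dict.insert, PySem.Dict.contains, PySem.Dict.items,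
      PySem.Dict.size, PySem.Dict.keys, PySem.Dict.getD, PySem.Dict.get?, PySem.Dict.ofList,
      PySem.Dict.update, PySem.List.min?] <;>
    by_cases c21 : f2 < f1 <;> (try simp [c21]) <;>
    by_cases c31 : f3 < f1 <;> (try simp [c31]) <;>
    by_cases c32 : f3 < f2 <;> (try simp [c32]) <;>
    (try unfold pvSel) <;> (try split_ifs) <;> first | rfl | omega

-- ===== VERDICT (by name: the statement is the Claim_ definition above) =====
theorem detect_form_type_spec : Claim_equal_detect_form_type := by
  intro text _
  unfold Spec_detect_form_type detect_form_type_alt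
  rw [pvScan_eq_pvSel, pvA_eq_pvE,
    pvE_eq_pvSel _ _ _ (PySem.Chars.neg_one_le_find _ _) (PySem.Chars.neg_one_le_find _ _)
      (PySem.Chars.neg_one_le_find _ _)]
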